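-- pv_equiv track=rewrite | github.com/BryceYangS/algorithms | Algorithms_Practice/test3.py | solution
-- ===== SOURCE A (Python) =====
-- from itertools import combinations
--
-- def solution(S):
--     # write your code in Python 3.6
--     cnt_a = 0
--     for char in S:
--         if char == 'a':
--             cnt_a += 1
--
--     if cnt_a % 3 != 0:
--         return 0
--     elif cnt_a == 0:
--         items = [i for i in range(len(S) - 1)]
--         # len(combinations(len))
--         return len(list(combinations(items, 2)))
--     else:
--         tmp_num = divmod(cnt_a, 3)
--         a_cnt = 0
--         tmp_arr = []
--         tmp_tuple = ()
--         for i in range(len(S)):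
--             if S[i] == 'a':
--                 a_cnt += 1
--                 if tmp_num[0] == 1:
--                     tmp_arr.append(i)
--                 else:
--                     if len(tmp_tuple) == 0:
--                         tmp_tuple = (i,)
--                     if a_cnt == tmp_num[0]:
--                         tmp_tuple += (i,)
--                         tmp_arr.append(tmp_tuple)
--                         tmp_tuple = ()
--                         a_cnt = 0
--         if tmp_num[0] ==1:
--             return (tmp_arr[1] - tmp_arr[0]) * (tmp_arr[2] - tmp_arr[1])
--         else:
--             return (tmp_arr[1][0] - tmp_arr[0][1]) * (tmp_arr[2][0] - tmp_arr[1][1])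
-- ===== SOURCE B (Python) =====
-- def solution(S):
--     pos = [i for i, ch in enumerate(S) if ch == 'a']
--     c = len(pos)
--     if c % 3 != 0:
--         return 0
--     if c == 0:
--         m = len(S) - 1
--         return m * (m - 1) // 2 if m >= 0 else 0
--     k = c // 3
--     return (pos[k] - pos[k - 1]) * (pos[2 * k] - pos[2 * k - 1])
-- ===== Notes on version B (the rewrite author's own statement) =====
-- stated objective: faster
-- what changed: B builds the list of positions of the letter a once and reads the group-boundary gaps by direct indexing (pos[k]-pos[k-1])*(pos[2k]-pos[2k-1]), replacing A's stateful tuple-collecting loop, and replaces A's materialization of all C(n-1,2) index pairs in the letterless case by the closed form m*(m-1)//2.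
import Mathlib
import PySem

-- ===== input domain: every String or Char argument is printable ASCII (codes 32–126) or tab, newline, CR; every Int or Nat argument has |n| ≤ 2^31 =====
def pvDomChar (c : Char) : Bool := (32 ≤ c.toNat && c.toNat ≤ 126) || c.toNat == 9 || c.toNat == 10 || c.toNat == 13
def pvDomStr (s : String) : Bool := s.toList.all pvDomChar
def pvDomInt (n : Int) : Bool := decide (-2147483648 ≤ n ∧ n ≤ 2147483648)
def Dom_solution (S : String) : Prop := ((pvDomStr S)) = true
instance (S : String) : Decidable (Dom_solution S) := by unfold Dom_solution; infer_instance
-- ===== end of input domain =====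

-- B replaces A's materialisation of all index pairs by the closed form m*(m-1)//2 and A's
-- stateful group-collecting loop by direct indexing into the list of positions of the letter a (objective: faster).

-- ===== PORT A =====
-- body of A's `for i in range(len(S))` loop in the cnt_a > 3 case (state = (a_cnt, tmp_arr, tmp_tuple);
-- tmp_tuple, which Python grows from () to (i,) and then to (first, i), is an Option Int holding its first component)
def solAStep (k : Int) (st : Int × List (Int × Int) × Option Int) (i : Int) :
    Int × List (Int × Int) × Option Int :=
  let a_cnt := st.1 + 1
  let tup := if st.2.2 = none then some i else st.2.2
  if a_cnt = k then (0, st.2.1 ++ [(tup.getD 0, i)], none) else (a_cnt, st.2.1, tup)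

-- A's list indexing tmp_arr[0] / tmp_arr[1] / tmp_arr[2] is always in range when reached
-- (cnt_a is a positive multiple of 3), so the `.getD` default is never used.
def solution (S : String) : Int :=
  let l := S.toList
  let cnt_a : Int := l.foldl (fun c ch => if ch == 'a' then c + 1 else c) 0
  if PySem.Int.mod cnt_a 3 ≠ 0 then 0
  else if cnt_a = 0 then
    let items := PySem.List.pyRange 0 ((l.length : Int) - 1) 1
    ((items.sublistsLen 2).length : Int)
  else
    let tmp_num := (PySem.Int.floordiv cnt_a 3, PySem.Int.mod cnt_a 3)
    if tmp_num.1 = 1 then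
      let arr := (PySem.List.pyRange 0 ((l.length : Int)) 1).foldl
        (fun arr i => if PySem.List.pyGetD l i ' ' == 'a' then arr ++ [i] else arr) ([] : List Int)
      (PySem.List.pyGetD arr 1 0 - PySem.List.pyGetD arr 0 0) *
        (PySem.List.pyGetD arr 2 0 - PySem.List.pyGetD arr 1 0)
    else
      let st := (PySem.List.pyRange 0 ((l.length : Int)) 1).foldl
        (fun st i => if PySem.List.pyGetD l i ' ' == 'a' then solAStep tmp_num.1 st i else st)
        (0, [], none)
      let arr := st.2.1
      ((PySem.List.pyGetD arr 1 (0, 0)).1 - (PySem.List.pyGetD arr 0 (0, 0)).2) *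
        ((PySem.List.pyGetD arr 2 (0, 0)).1 - (PySem.List.pyGetD arr 1 (0, 0)).2)

-- ===== PORT B =====
-- B's comprehension [i for i, ch in enumerate(S) if ch == 'a']
def posOf (l : List Char) : List Int :=
  ((PySem.List.enumerate l 0).filter (fun p => p.2 == 'a')).map (fun p => p.1)

def solution_alt (S : String) : Int :=
  let pos := posOf S.toList
  let c := pos.length
  if c % 3 ≠ 0 then 0
  else if c = 0 then
    let m : Int := (S.toList.length : Int) - 1
    if 0 ≤ m then PySem.Int.floordiv (m * (m - 1)) 2 else 0
  else
    let k := c / 3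
    (pos.getD k 0 - pos.getD (k - 1) 0) * (pos.getD (2 * k) 0 - pos.getD (2 * k - 1) 0)

-- ===== PRECONDITION & SPEC =====
def Spec_solution (S : String) (out : Int) : Prop := out = solution_alt S
instance (S : String) (out : Int) : Decidable (Spec_solution S out) := by unfold Spec_solution; infer_instance

-- ===== CLAIM (what is proved, stated in full; the proofs are below) =====
def Claim_equal_solution : Prop := ∀ (S : String), Dom_solution S → Spec_solution S (solution S)

-- ===== LEMMAS AND PROOFS =====

-- A's counting loop counts exactly the elements of B's position list
theorem count_eq_pos (l : List Char) : ∀ (s acc : Int),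
    l.foldl (fun c ch => if ch == 'a' then c + 1 else c) acc
      = acc + ((((PySem.List.enumerate l s).filter (fun p => p.2 == 'a')).length : Int)) := by
  induction l with
  | nil => intro s acc; simp [PySem.List.enumerate]
  | cons x xs ih =>
    intro s acc
    rw [PySem.List.enumerate_cons, List.foldl_cons]
    by_cases hx : x == 'a'
    · rw [if_pos hx, List.filter_cons_of_pos (by simpa using hx), ih (s + 1)]
      simp; ring
    · rw [if_neg hx, List.filter_cons_of_neg (by simpa using hx), ih (s + 1)]

theorem pyGetD_enumerate_mem (l : List Char) (p : Int × Char)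
    (hp : p ∈ PySem.List.enumerate l 0) : PySem.List.pyGetD l p.1 ' ' = p.2 := by
  rw [List.mem_iff_getElem] at hp
  obtain ⟨k, hk, hEq⟩ := hp
  rw [PySem.List.length_enumerate] at hk
  rw [PySem.List.getElem_enumerate l 0 k (by simpa [PySem.List.length_enumerate])] at hEq
  subst hEq
  simp [PySem.List.pyGetD_natCast, hk]

-- A's `for i in range(len(S)): if S[i] == 'a': <update with i>` is a fold over B's position list
theorem loop_to_pos {σ : Type} (g : σ → Int → σ) (l : List Char) (init : σ) :
    (PySem.List.pyRange 0 ((l.length : Int)) 1).foldl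
        (fun st i => if PySem.List.pyGetD l i ' ' == 'a' then g st i else st) init
      = (posOf l).foldl g init := by
  have hrange : PySem.List.pyRange 0 ((l.length : Int)) 1
      = (PySem.List.enumerate l 0).map (fun p => p.1) := by
    rw [PySem.List.map_fst_enumerate]; norm_num
  rw [hrange, List.foldl_map]
  rw [PySem.List.foldl_congr_mem _ _
    (fun st (p : Int × Char) => if p.2 == 'a' then g st p.1 else st) init
    (by intro acc p hp; rw [pyGetD_enumerate_mem l p hp])]
  unfold posOf
  rw [List.foldl_map, List.foldl_filter]

-- the middle of one group of size k: r of its elements remain, its first index is q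
theorem solA_mid (k : Int) : ∀ (r : Nat) (xs : List Int) (q : Int)
    (arr : List (Int × Int)), 1 ≤ r → r ≤ xs.length →
    xs.foldl (solAStep k) (k - (r : Int), arr, some q)
      = (xs.drop r).foldl (solAStep k) (0, arr ++ [(q, xs.getD (r - 1) 0)], none) := by
  intro r
  induction r with
  | zero => intro xs q arr h1 h2; omega
  | succ r ih =>
    intro xs q arr _ hlen
    match xs with
    | [] => simp at hlen
    | x :: xs =>
      rcases Nat.eq_zero_or_pos r with hr0 | hrpos
      · subst hr0
        have hstep : solAStep k (k - ((0 + 1 : Nat) : Int), arr, some q) x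
            = (0, arr ++ [(q, x)], none) := by
          simp [solAStep]
        rw [List.foldl_cons, hstep]
        simp
      · obtain ⟨m, rfl⟩ : ∃ m, r = m + 1 := ⟨r - 1, by omega⟩
        have hstep : solAStep k (k - ((m + 1 + 1 : Nat) : Int), arr, some q) x
            = (k - ((m + 1 : Nat) : Int), arr, some q) := by
          have hcond : ¬ (k - ((m + 1 + 1 : Nat) : Int) + 1 = k) := by push_cast; omega
          simp only [solAStep]
          rw [if_neg hcond]
          simp [Prod.ext_iff]
          ring
        rw [List.foldl_cons, hstep,
          ih xs q arr (by omega) (by simpa using Nat.succ_le_succ_iff.mp (by simpa using hlen))]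
        simp

-- one full group of K elements is consumed, appending (first index, last index of the group)
theorem solA_group (K : Nat) (hK : 2 ≤ K) (P : List Int) (arr : List (Int × Int))
    (h : K ≤ P.length) :
    P.foldl (solAStep (K : Int)) (0, arr, none)
      = (P.drop K).foldl (solAStep (K : Int))
          (0, arr ++ [(P.getD 0 0, P.getD (K - 1) 0)], none) := by
  match P with
  | [] => simp at h; omega
  | x :: xs =>
    have hstep : solAStep (K : Int) (0, arr, none) x = (1, arr, some x) := by
      have hne : ¬ ((0 : Int) + 1 = (K : Int)) := by push_cast; omega
      simp only [solAStep]
      rw [if_neg hne]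
      simp
    have hrw : ((1 : Int), arr, some x) = ((K : Int) - ((K - 1 : Nat) : Int), arr, some x) := by
      have : ((K - 1 : Nat) : Int) = (K : Int) - 1 := by omega
      rw [this]; ring_nf
    rw [List.foldl_cons, hstep, hrw,
      solA_mid (K : Int) (K - 1) xs x arr (by omega) (by simp at h; omega)]
    obtain ⟨t, rfl⟩ : ∃ t, K = t + 2 := ⟨K - 2, by omega⟩
    simp

-- the whole loop for cnt_a = 3K, K ≥ 2: three groups, and the pairs A keeps
theorem solA_three (K : Nat) (hK : 2 ≤ K) (P : List Int) (h : P.length = 3 * K) :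
    P.foldl (solAStep (K : Int)) (0, [], none)
      = (0, [(P.getD 0 0, P.getD (K - 1) 0),
             (P.getD K 0, P.getD (2 * K - 1) 0),
             (P.getD (2 * K) 0, P.getD (3 * K - 1) 0)], none) := by
  rw [solA_group K hK P _ (by omega)]
  rw [solA_group K hK _ _ (by simp [h]; omega)]
  rw [solA_group K hK _ _ (by simp [h]; omega)]
  have hnil : (((P.drop K).drop K).drop K) = [] := by
    simp [List.drop_drop, h]; omega
  rw [hnil, List.foldl_nil]
  have e1 : K + (K - 1) = 2 * K - 1 := by omega
  have e2 : K + K = 2 * K := by omega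
  have e3 : 2 * K + (K - 1) = 3 * K - 1 := by omega
  simp [List.drop_drop, e1, e2, e3]

-- the cnt_a = 0 branch: len(list(combinations(range(n-1), 2))) equals the closed form (n-1)(n-2)/2
theorem zero_case (N : Nat) :
    ((List.sublistsLen 2 (PySem.List.pyRange 0 ((N : Int) - 1) 1)).length : Int)
      = if 0 ≤ (N : Int) - 1 then PySem.Int.floordiv (((N : Int) - 1) * ((N : Int) - 1 - 1)) 2
        else 0 := by
  match N with
  | 0 =>
    rw [PySem.List.pyRange_one_eq_nil (by norm_num)]
    norm_num
  | (n + 1) =>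
    have hlen : (PySem.List.pyRange 0 (((n + 1 : Nat) : Int) - 1) 1).length = n := by
      rw [PySem.List.length_pyRange_one]; push_cast; omega
    rw [List.length_sublistsLen, hlen, if_pos (by push_cast; omega)]
    have hprod : (((n + 1 : Nat) : Int) - 1) * (((n + 1 : Nat) : Int) - 1 - 1)
        = ((n * (n - 1) : Nat) : Int) := by
      match n with
      | 0 => norm_num
      | (m + 1) => push_cast [Nat.add_sub_cancel]; ring_nf
    have hdiv2 : PySem.Int.floordiv ((n * (n - 1) : Nat) : Int) 2 = ((n * (n - 1) / 2 : Nat) : Int) := by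
      exact_mod_cast PySem.Int.floordiv_natCast (n * (n - 1)) 2
    rw [hprod, hdiv2, Nat.choose_two_right]

-- ===== VERDICT (by name: the statement is the Claim_ definition above) =====
theorem solution_spec : Claim_equal_solution := by
  intro S _
  unfold Spec_solution
  simp only [solution, solution_alt]
  have hc : S.toList.foldl (fun c ch => if ch == 'a' then c + 1 else c) 0
      = (((posOf S.toList).length : Nat) : Int) := by
    rw [count_eq_pos S.toList 0 0]; simp [posOf]
  rw [hc]
  set P := posOf S.toList with hP
  set c := P.length with hcn
  have hmod : PySem.Int.mod (c : Int) 3 = ((c % 3 : Nat) : Int) := by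
    exact_mod_cast PySem.Int.mod_natCast c 3
  have hdiv : PySem.Int.floordiv (c : Int) 3 = ((c / 3 : Nat) : Int) := by
    exact_mod_cast PySem.Int.floordiv_natCast c 3
  by_cases h3 : c % 3 = 0
  · have hA1 : ¬ (PySem.Int.mod (c : Int) 3 ≠ 0) := by
      rw [hmod, h3]; simp
    have hB1 : ¬ (c % 3 ≠ 0) := by simp [h3]
    rw [if_neg hA1, if_neg hB1]
    by_cases h0 : c = 0
    · rw [if_pos (show ((c : Nat) : Int) = 0 by exact_mod_cast h0), if_pos h0]
      exact zero_case S.toList.length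
    · rw [if_neg (show ¬ ((c : Nat) : Int) = 0 by exact_mod_cast h0), if_neg h0]
      rw [hdiv]
      set K := c / 3 with hK
      have hcK : c = 3 * K := by omega
      by_cases h1 : K = 1
      · rw [if_pos (show ((K : Nat) : Int) = 1 by exact_mod_cast h1)]
        rw [loop_to_pos (fun arr i => arr ++ [i]) S.toList []]
        rw [PySem.List.foldl_append_singleton, List.nil_append, ← hP]
        obtain ⟨a, b, c', hPl⟩ := List.length_eq_three.mp (by omega : P.length = 3)
        rw [hPl, h1]
        norm_num [PySem.List.pyGetD, show ((2:Int)).toNat = 2 from rfl,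
          show ((1:Int)).toNat = 1 from rfl, show ((0:Int)).toNat = 0 from rfl]
      · rw [if_neg (show ¬ ((K : Nat) : Int) = 1 by exact_mod_cast h1)]
        have hK2 : 2 ≤ K := by omega
        rw [loop_to_pos (solAStep (K : Int)) S.toList ((0 : Int), ([] : List (Int × Int)), (none : Option Int))]
        rw [← hP, solA_three K hK2 P (by omega)]
        norm_num [PySem.List.pyGetD, show ((2:Int)).toNat = 2 from rfl,
          show ((1:Int)).toNat = 1 from rfl, show ((0:Int)).toNat = 0 from rfl]
  · have hA1 : PySem.Int.mod (c : Int) 3 ≠ 0 := by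
      rw [hmod]; exact_mod_cast h3
    rw [if_pos hA1, if_pos h3]
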